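-- pv_equiv track=rewrite | github.com/mpm214/Portfolio_Allocation | CODE/Strategy_Performance.py | calculate_recovery_time
-- ===== SOURCE A (Python) =====
-- def calculate_recovery_time(series):
--     recovery_times = []
--     count = 0
--     for value in series:
--         if value == 1:
--             recovery_times.append(count)
--             count = 0
--         else:
--             recovery_times.append(0)
--             count += 1
--     return recovery_times
-- ===== SOURCE B (Python) =====
-- from itertools import groupby
--
-- def calculate_recovery_time(series):
--     # Walk maximal runs of ones / non-ones; one 'pending' counter per run.
--     result = []
--     pending = 0
--     for is_one, grp in groupby(series, key=lambda x: x == 1):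
--         n = sum(1 for _ in grp)
--         if is_one:
--             result.append(pending)
--             result.extend([0] * (n - 1))
--             pending = 0
--         else:
--             result.extend([0] * n)
--             pending = n
--     return result
-- ===== Notes on version B (the rewrite author's own statement) =====
-- stated objective: alternative
-- what changed: B walks maximal runs via itertools.groupby, emitting the pending non-one run length at the first 1 of each ones-run and zeros elsewhere, instead of A's per-element counter loop.
import Mathlib
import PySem

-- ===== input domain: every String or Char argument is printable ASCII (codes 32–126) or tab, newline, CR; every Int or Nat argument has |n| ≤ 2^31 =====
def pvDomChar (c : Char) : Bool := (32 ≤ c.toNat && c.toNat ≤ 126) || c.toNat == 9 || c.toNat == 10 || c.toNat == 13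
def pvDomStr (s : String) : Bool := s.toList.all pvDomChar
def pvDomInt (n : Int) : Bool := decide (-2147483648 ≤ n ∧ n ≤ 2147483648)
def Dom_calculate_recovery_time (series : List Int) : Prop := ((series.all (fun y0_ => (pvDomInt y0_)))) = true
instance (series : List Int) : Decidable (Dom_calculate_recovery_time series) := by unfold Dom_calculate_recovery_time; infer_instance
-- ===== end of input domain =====

-- B replaces A's per-element counter loop by a run-based (groupby) walk; same O(n) cost, alternative decomposition.


-- ===== PORT A =====
-- literal loop: state = (recovery_times, count), appending per element
def calculate_recovery_time (series : List Int) : List Int :=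
  (series.foldl
    (fun (st : List Int × Int) value =>
      if value = 1 then (st.1 ++ [st.2], 0) else (st.1 ++ [0], st.2 + 1))
    ([], 0)).1

-- ===== PORT B =====
-- groupby run walk: consume one maximal run per step, keep 'pending'
def calculate_recovery_time_alt_go (series : List Int) (pending : Int) : List Int :=
  match series with
  | [] => []
  | v :: rest =>
    if v = 1 then
      let ones := rest.takeWhile (fun x => x == 1)
      let tail := rest.dropWhile (fun x => x == 1)
      (pending :: ones.map (fun _ => (0 : Int))) ++ calculate_recovery_time_alt_go tail 0
    else
      let nons := rest.takeWhile (fun x => !(x == 1))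
      let tail := rest.dropWhile (fun x => !(x == 1))
      (0 :: nons.map (fun _ => (0 : Int))) ++ calculate_recovery_time_alt_go tail (1 + nons.length)
  termination_by series.length
  decreasing_by
    · exact Nat.lt_succ_of_le (List.length_dropWhile_le _ _)
    · exact Nat.lt_succ_of_le (List.length_dropWhile_le _ _)

def calculate_recovery_time_alt (series : List Int) : List Int :=
  calculate_recovery_time_alt_go series 0

-- ===== PRECONDITION & SPEC =====
def Spec_calculate_recovery_time (series : List Int) (out : List Int) : Prop := out = calculate_recovery_time_alt series
instance (series : List Int) (out : List Int) : Decidable (Spec_calculate_recovery_time series out) := by unfold Spec_calculate_recovery_time; infer_instance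

-- ===== CLAIM (what is proved, stated in full; the proofs are below) =====
def Claim_equal_calculate_recovery_time : Prop := ∀ (series : List Int), Dom_calculate_recovery_time series → Spec_calculate_recovery_time series (calculate_recovery_time series)

-- ===== LEMMAS AND PROOFS =====

-- element-at-a-time recursive form of A's loop (proof helper)
def goA : List Int → Int → List Int
  | [], _ => []
  | v :: rest, c => if v = 1 then c :: goA rest 0 else 0 :: goA rest (c + 1)

theorem foldl_goA (series : List Int) (acc : List Int) (c : Int) :
    (series.foldl
      (fun (st : List Int × Int) value =>
        if value = 1 then (st.1 ++ [st.2], 0) else (st.1 ++ [0], st.2 + 1))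
      (acc, c)).1 = acc ++ goA series c := by
  induction series generalizing acc c with
  | nil => simp [goA]
  | cons v rest ih =>
    simp only [List.foldl_cons, goA]
    by_cases h : v = 1 <;> simp [h, ih]

theorem goA_ones (l t : List Int) (h : ∀ x ∈ l, x = 1) :
    goA (l ++ t) 0 = l.map (fun _ => (0 : Int)) ++ goA t 0 := by
  induction l with
  | nil => simp
  | cons x xs ih =>
    have hx : x = 1 := h x (by simp)
    simp [goA, hx, ih (fun y hy => h y (by simp [hy]))]

theorem goA_nons (l : List Int) (t : List Int) (c : Int) (h : ∀ x ∈ l, x ≠ 1) :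
    goA (l ++ t) c = l.map (fun _ => (0 : Int)) ++ goA t (c + l.length) := by
  induction l generalizing c with
  | nil => simp
  | cons x xs ih =>
    have hx : x ≠ 1 := h x (by simp)
    have := ih (c + 1) (fun y hy => h y (by simp [hy]))
    simp [goA, hx, this]
    ring_nf

theorem hd_dropWhile (p : Int → Bool) (l : List Int) (hd : Int)
    (h : (l.dropWhile p).head? = some hd) : ¬ p hd := by
  have hne : l.dropWhile p ≠ [] := by intro he; rw [he] at h; simp at h
  have h2 := List.head_dropWhile_not p hne
  rw [List.head?_eq_some_head hne] at h
  simpa [← Option.some_inj.mp h] using h2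

theorem goA_eq_alt_go : ∀ (n : Nat) (series : List Int) (c : Int),
    series.length ≤ n →
    (c = 0 ∨ ∀ hd, series.head? = some hd → hd = 1) →
    goA series c = calculate_recovery_time_alt_go series c := by
  intro n
  induction n with
  | zero =>
    intro series c hlen _
    have : series = [] := List.eq_nil_of_length_eq_zero (Nat.le_zero.mp hlen)
    simp [this, goA, calculate_recovery_time_alt_go]
  | succ n ih =>
    intro series c hlen hc
    match series with
    | [] => simp [goA, calculate_recovery_time_alt_go]
    | v :: rest =>
      by_cases hv : v = 1
      · -- ones run
        have hsplit : rest.takeWhile (fun x => x == 1) ++ rest.dropWhile (fun x => x == 1) = rest :=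
          List.takeWhile_append_dropWhile
        have hones : ∀ x ∈ rest.takeWhile (fun x => x == 1), x = 1 := by
          intro x hx
          simpa using List.mem_takeWhile_imp hx
        have hlen' : (rest.dropWhile (fun x => x == 1)).length ≤ n := by
          have := List.length_dropWhile_le (fun x => (x == 1)) rest
          simp at hlen; omega
        have hgo : goA rest 0 =
            (rest.takeWhile (fun x => x == 1)).map (fun _ => (0 : Int)) ++
              calculate_recovery_time_alt_go (rest.dropWhile (fun x => x == 1)) 0 := by
          conv_lhs => rw [← hsplit]
          rw [goA_ones _ _ hones, ih _ 0 hlen' (Or.inl rfl)]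
        rw [goA, calculate_recovery_time_alt_go]
        simp only [hv]
        simp [hgo]
      · -- non-ones run: the incoming counter must be 0
        have hc0 : c = 0 := by
          rcases hc with h | h
          · exact h
          · exact absurd (h v rfl) hv
        subst hc0
        have hsplit : rest.takeWhile (fun x => !(x == 1)) ++ rest.dropWhile (fun x => !(x == 1)) = rest :=
          List.takeWhile_append_dropWhile
        have hnons : ∀ x ∈ rest.takeWhile (fun x => !(x == 1)), x ≠ 1 := by
          intro x hx
          simpa using List.mem_takeWhile_imp hx
        have htail : ∀ hd, (rest.dropWhile (fun x => !(x == 1))).head? = some hd → hd = 1 := by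
          intro hd hhd
          have := hd_dropWhile _ _ _ hhd
          simpa using this
        have hlen' : (rest.dropWhile (fun x => !(x == 1))).length ≤ n := by
          have := List.length_dropWhile_le (fun x => !(x == 1)) rest
          simp at hlen; omega
        have hgo : goA rest 1 =
            (rest.takeWhile (fun x => !(x == 1))).map (fun _ => (0 : Int)) ++
              calculate_recovery_time_alt_go (rest.dropWhile (fun x => !(x == 1)))
                (1 + (rest.takeWhile (fun x => !(x == 1))).length) := by
          conv_lhs => rw [← hsplit]
          rw [goA_nons _ _ 1 hnons, ih _ _ hlen' (Or.inr htail)]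
        rw [goA, calculate_recovery_time_alt_go]
        simp only [hv]
        simp [hgo]

-- ===== VERDICT (by name: the statement is the Claim_ definition above) =====
theorem calculate_recovery_time_spec : Claim_equal_calculate_recovery_time := by
  intro series _
  unfold Spec_calculate_recovery_time calculate_recovery_time calculate_recovery_time_alt
  rw [foldl_goA, List.nil_append]
  exact goA_eq_alt_go series.length series 0 le_rfl (Or.inl rfl)
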